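-- pv_equiv track=rewrite | github.com/sonpham-org/arc-agi-3 | scaffoldings/agent_spawn/tools.py | as_diff_frames
-- ===== SOURCE A (Python) =====
-- COLOR_NAMES = {
--     0: "White", 1: "LightGray", 2: "Gray", 3: "DarkGray",
--     4: "VeryDarkGray", 5: "Black", 6: "Magenta", 7: "LightMagenta",
--     8: "Red", 9: "Blue", 10: "LightBlue", 11: "Yellow",
--     12: "Orange", 13: "Maroon", 14: "Green", 15: "Purple",
-- }
--
-- def as_diff_frames(old_grid: list, new_grid: list) -> str:
--     """Region-grouped diff between old and new grid — shows what changed and where."""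
--     if not old_grid or not new_grid:
--         return "(cannot diff: missing grid)"
--     changes = []
--     for r in range(min(len(old_grid), len(new_grid))):
--         old_row = old_grid[r]
--         new_row = new_grid[r]
--         for c in range(min(len(old_row), len(new_row))):
--             if old_row[c] != new_row[c]:
--                 old_name = COLOR_NAMES.get(old_row[c], str(old_row[c]))
--                 new_name = COLOR_NAMES.get(new_row[c], str(new_row[c]))
--                 changes.append((r, c, old_name, new_name))
--
--     if not changes:
--         return "(no changes)"
--
--     # Group by contiguous regions
--     lines = [f"Total: {len(changes)} cells changed"]
--     # Group by row for readability
--     current_row = -1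
--     for r, c, old_name, new_name in changes:
--         if r != current_row:
--             current_row = r
--             lines.append(f"  Row {r}:")
--         lines.append(f"    col {c}: {old_name} -> {new_name}")
--
--     # Truncate if too many changes
--     if len(lines) > 60:
--         lines = lines[:30] + [f"  ... ({len(changes)} total changes, truncated)"] + lines[-10:]
--
--     return "\n".join(lines)
-- ===== SOURCE B (Python) =====
-- COLOR_NAMES = {
--     0: "White", 1: "LightGray", 2: "Gray", 3: "DarkGray",
--     4: "VeryDarkGray", 5: "Black", 6: "Magenta", 7: "LightMagenta",
--     8: "Red", 9: "Blue", 10: "LightBlue", 11: "Yellow",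
--     12: "Orange", 13: "Maroon", 14: "Green", 15: "Purple",
-- }
--
-- def as_diff_frames(old_grid: list, new_grid: list) -> str:
--     """Region-grouped diff between old and new grid — shows what changed and where."""
--     if not old_grid or not new_grid:
--         return "(cannot diff: missing grid)"
--     body = []
--     count = 0
--     for r in range(min(len(old_grid), len(new_grid))):
--         old_row = old_grid[r]
--         new_row = new_grid[r]
--         cols = [
--             f"    col {c}: {COLOR_NAMES.get(old_row[c], str(old_row[c]))}"
--             f" -> {COLOR_NAMES.get(new_row[c], str(new_row[c]))}"
--             for c in range(min(len(old_row), len(new_row)))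
--             if old_row[c] != new_row[c]
--         ]
--         if cols:
--             body.append(f"  Row {r}:")
--             body.extend(cols)
--             count += len(cols)
--     if count == 0:
--         return "(no changes)"
--     lines = [f"Total: {count} cells changed"] + body
--     if len(lines) > 60:
--         lines = lines[:30] + [f"  ... ({count} total changes, truncated)"] + lines[-10:]
--     return "\n".join(lines)
-- ===== Notes on version B (the rewrite author's own statement) =====
-- stated objective: simpler
-- what changed: B replaces A's two phases (collect a list of (row,col,old,new) change tuples, then a second sentinel-driven pass grouping them into row blocks) with a single row-major pass that builds each row's block directly from a per-row comprehension and keeps a running count.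
import Mathlib
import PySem

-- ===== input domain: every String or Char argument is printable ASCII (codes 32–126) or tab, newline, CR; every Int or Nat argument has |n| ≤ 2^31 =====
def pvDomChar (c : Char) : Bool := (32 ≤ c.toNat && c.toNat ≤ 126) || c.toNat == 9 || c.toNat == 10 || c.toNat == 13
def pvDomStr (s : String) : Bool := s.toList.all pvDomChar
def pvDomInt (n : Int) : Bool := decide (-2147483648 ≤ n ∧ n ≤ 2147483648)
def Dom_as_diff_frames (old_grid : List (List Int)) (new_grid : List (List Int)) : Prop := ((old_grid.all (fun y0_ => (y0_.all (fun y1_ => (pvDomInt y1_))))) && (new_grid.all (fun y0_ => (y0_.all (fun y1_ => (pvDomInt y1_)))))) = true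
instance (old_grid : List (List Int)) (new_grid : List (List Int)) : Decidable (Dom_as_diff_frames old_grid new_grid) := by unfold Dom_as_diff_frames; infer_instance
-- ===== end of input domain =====

-- B fuses A's collect-changes pass and its grouping pass into one row-major pass that
-- builds each row's block directly (objective: simpler — no intermediate tuple list).


-- Shared constant: COLOR_NAMES and the COLOR_NAMES.get(x, str(x)) lookup (identical in both Pythons)
def pvColorNames : PySem.Dict Int String := PySem.Dict.ofList
  [(0, "White"), (1, "LightGray"), (2, "Gray"), (3, "DarkGray"),
   (4, "VeryDarkGray"), (5, "Black"), (6, "Magenta"), (7, "LightMagenta"),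
   (8, "Red"), (9, "Blue"), (10, "LightBlue"), (11, "Yellow"),
   (12, "Orange"), (13, "Maroon"), (14, "Green"), (15, "Purple")]

def pvColorName (v : Int) : String := PySem.Dict.getD pvColorNames v (PySem.Int.toStr v)

-- ===== PORT A =====
-- inner 'for c in range(...)' loop of A (indices r, c are always in range, so pyGetD's default is never used)
def pvA_rowScan (old_row new_row : List Int) (r : Int)
    (changes : List (Int × Int × String × String)) : List (Int × Int × String × String) :=
  (PySem.List.pyRange 0 ((min old_row.length new_row.length : Nat) : Int) 1).foldl
    (fun changes c =>
      if PySem.List.pyGetD old_row c 0 ≠ PySem.List.pyGetD new_row c 0 then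
        changes ++ [(r, c, pvColorName (PySem.List.pyGetD old_row c 0),
                           pvColorName (PySem.List.pyGetD new_row c 0))]
      else changes)
    changes

-- the grouping step of A's second loop (state = (current_row, lines))
def pvA_gstep (st : Int × List String) (ch : Int × Int × String × String) : Int × List String :=
  let st2 := if ch.1 ≠ st.1 then (ch.1, st.2 ++ ["  Row " ++ PySem.Int.toStr ch.1 ++ ":"]) else st
  (st2.1, st2.2 ++ ["    col " ++ PySem.Int.toStr ch.2.1 ++ ": " ++ ch.2.2.1 ++ " -> " ++ ch.2.2.2])

def as_diff_frames (old_grid : List (List Int)) (new_grid : List (List Int)) : String :=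
  if old_grid = [] ∨ new_grid = [] then "(cannot diff: missing grid)"
  else
    let changes :=
      (PySem.List.pyRange 0 ((min old_grid.length new_grid.length : Nat) : Int) 1).foldl
        (fun changes r =>
          pvA_rowScan (PySem.List.pyGetD old_grid r []) (PySem.List.pyGetD new_grid r []) r changes)
        []
    if changes = [] then "(no changes)"
    else
      let lines := ["Total: " ++ PySem.Int.toStr (changes.length : Int) ++ " cells changed"]
      let lines := (changes.foldl pvA_gstep ((-1 : Int), lines)).2
      let lines :=
        if lines.length > 60 then
          PySem.List.slice lines none (some 30)
            ++ ["  ... (" ++ PySem.Int.toStr (changes.length : Int) ++ " total changes, truncated)"]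
            ++ PySem.List.slice lines (some (-10)) none
        else lines
      PySem.Str.join "\n" lines

-- ===== PORT B =====
-- the f-string of B's comprehension
def pvColLine (old_row new_row : List Int) (c : Int) : String :=
  "    col " ++ PySem.Int.toStr c ++ ": " ++ pvColorName (PySem.List.pyGetD old_row c 0)
    ++ " -> " ++ pvColorName (PySem.List.pyGetD new_row c 0)

-- B's per-row comprehension 'cols'
def pvRowCols (old_row new_row : List Int) : List String :=
  ((PySem.List.pyRange 0 ((min old_row.length new_row.length : Nat) : Int) 1).filter
      (fun c => decide (PySem.List.pyGetD old_row c 0 ≠ PySem.List.pyGetD new_row c 0))).map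
    (pvColLine old_row new_row)

-- B's loop body (state = (body, count))
def pvB_step (old_grid new_grid : List (List Int)) (st : List String × Int) (r : Int) :
    List String × Int :=
  let cols := pvRowCols (PySem.List.pyGetD old_grid r []) (PySem.List.pyGetD new_grid r [])
  if cols = [] then st
  else (st.1 ++ ("  Row " ++ PySem.Int.toStr r ++ ":") :: cols, st.2 + (cols.length : Int))

def as_diff_frames_alt (old_grid : List (List Int)) (new_grid : List (List Int)) : String :=
  if old_grid = [] ∨ new_grid = [] then "(cannot diff: missing grid)"
  else
    let st :=
      (PySem.List.pyRange 0 ((min old_grid.length new_grid.length : Nat) : Int) 1).foldl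
        (pvB_step old_grid new_grid) ([], 0)
    if st.2 = 0 then "(no changes)"
    else
      let lines := ("Total: " ++ PySem.Int.toStr st.2 ++ " cells changed") :: st.1
      let lines :=
        if lines.length > 60 then
          PySem.List.slice lines none (some 30)
            ++ ["  ... (" ++ PySem.Int.toStr st.2 ++ " total changes, truncated)"]
            ++ PySem.List.slice lines (some (-10)) none
        else lines
      PySem.Str.join "\n" lines

-- ===== PRECONDITION & SPEC =====
def Spec_as_diff_frames (old_grid : List (List Int)) (new_grid : List (List Int)) (out : String) : Prop := out = as_diff_frames_alt old_grid new_grid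
instance (old_grid : List (List Int)) (new_grid : List (List Int)) (out : String) : Decidable (Spec_as_diff_frames old_grid new_grid out) := by unfold Spec_as_diff_frames; infer_instance

-- ===== CLAIM (what is proved, stated in full; the proofs are below) =====
def Claim_equal_as_diff_frames : Prop := ∀ (old_grid : List (List Int)) (new_grid : List (List Int)), Dom_as_diff_frames old_grid new_grid → Spec_as_diff_frames old_grid new_grid (as_diff_frames old_grid new_grid)

-- ===== LEMMAS AND PROOFS =====

-- the change tuples of one row (A's inner loop, as filter+map)
def pvRowCh (old_row new_row : List Int) (r : Int) : List (Int × Int × String × String) :=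
  ((PySem.List.pyRange 0 ((min old_row.length new_row.length : Nat) : Int) 1).filter
      (fun c => decide (PySem.List.pyGetD old_row c 0 ≠ PySem.List.pyGetD new_row c 0))).map
    (fun c => (r, c, pvColorName (PySem.List.pyGetD old_row c 0),
                     pvColorName (PySem.List.pyGetD new_row c 0)))

def pvColLineOf (ch : Int × Int × String × String) : String :=
  "    col " ++ PySem.Int.toStr ch.2.1 ++ ": " ++ ch.2.2.1 ++ " -> " ++ ch.2.2.2

-- per-row block of output lines
def pvBlk (old_grid new_grid : List (List Int)) (r : Int) : List String :=
  let cols := pvRowCols (PySem.List.pyGetD old_grid r []) (PySem.List.pyGetD new_grid r [])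
  if cols = [] then [] else ("  Row " ++ PySem.Int.toStr r ++ ":") :: cols

theorem pvA_rowScan_eq (old_row new_row : List Int) (r : Int)
    (changes : List (Int × Int × String × String)) :
    pvA_rowScan old_row new_row r changes = changes ++ pvRowCh old_row new_row r := by
  unfold pvA_rowScan pvRowCh
  exact PySem.List.foldl_append_ite _ _ _ _

theorem pvRowCh_map_colLine (old_row new_row : List Int) (r : Int) :
    (pvRowCh old_row new_row r).map pvColLineOf = pvRowCols old_row new_row := by
  unfold pvRowCh pvRowCols
  simp [List.map_map, pvColLineOf, pvColLine, Function.comp]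

theorem pvRowCh_length (old_row new_row : List Int) (r : Int) :
    (pvRowCh old_row new_row r).length = (pvRowCols old_row new_row).length := by
  unfold pvRowCh pvRowCols; simp

theorem pvRowCh_fst (old_row new_row : List Int) (r : Int) :
    ∀ x ∈ pvRowCh old_row new_row r, x.1 = r := by
  intro x hx
  unfold pvRowCh at hx
  simp only [List.mem_map] at hx
  obtain ⟨c, -, rfl⟩ := hx
  rfl

theorem pvA_changes_eq (old_grid new_grid : List (List Int)) :
    ((PySem.List.pyRange 0 ((min old_grid.length new_grid.length : Nat) : Int) 1).foldl
        (fun changes r =>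
          pvA_rowScan (PySem.List.pyGetD old_grid r []) (PySem.List.pyGetD new_grid r []) r changes)
        []) =
      (PySem.List.pyRange 0 ((min old_grid.length new_grid.length : Nat) : Int) 1).flatMap
        (fun r => pvRowCh (PySem.List.pyGetD old_grid r []) (PySem.List.pyGetD new_grid r []) r) := by
  simp only [pvA_rowScan_eq]
  exact PySem.List.foldl_append_eq_flatMap _ _ _

-- grouping fold over the tuples of one row, sentinel already on r
theorem pv_gfold_same (r : Int) (l : List (Int × Int × String × String))
    (h : ∀ x ∈ l, x.1 = r) (lines : List String) :
    l.foldl pvA_gstep (r, lines) = (r, lines ++ l.map pvColLineOf) := by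
  induction l generalizing lines with
  | nil => simp
  | cons x t ih =>
    have hx : x.1 = r := h x (by simp)
    simp only [List.foldl_cons]
    have hstep : pvA_gstep (r, lines) x = (r, lines ++ [pvColLineOf x]) := by
      simp [pvA_gstep, hx, pvColLineOf]
    rw [hstep, ih (fun y hy => h y (by simp [hy]))]
    simp

-- grouping fold over one row's tuples with a stale sentinel
theorem pv_gfold_row (r : Int) (l : List (Int × Int × String × String))
    (h : ∀ x ∈ l, x.1 = r) (cr : Int) (hne : cr ≠ r) (lines : List String) :
    l.foldl pvA_gstep (cr, lines) =
      if l = [] then (cr, lines)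
      else (r, lines ++ ("  Row " ++ PySem.Int.toStr r ++ ":") :: l.map pvColLineOf) := by
  cases l with
  | nil => simp
  | cons x t =>
    have hx : x.1 = r := h x (by simp)
    simp only [List.foldl_cons, reduceCtorEq, if_false]
    have hstep : pvA_gstep (cr, lines) x =
        (r, (lines ++ ["  Row " ++ PySem.Int.toStr r ++ ":"]) ++ [pvColLineOf x]) := by
      simp [pvA_gstep, hx, Ne.symm hne, pvColLineOf]
    rw [hstep, pv_gfold_same r t (fun y hy => h y (by simp [hy]))]
    simp

-- grouping fold over all rows' tuples
theorem pv_gfold_rows (old_grid new_grid : List (List Int)) (rs : List Int)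
    (hs : rs.Pairwise (· < ·)) :
    ∀ (cr : Int) (lines : List String), (∀ r ∈ rs, cr < r) →
    ((rs.flatMap (fun r =>
        pvRowCh (PySem.List.pyGetD old_grid r []) (PySem.List.pyGetD new_grid r []) r)).foldl
      pvA_gstep (cr, lines)).2 = lines ++ rs.flatMap (pvBlk old_grid new_grid) := by
  induction rs with
  | nil => intro cr lines _; simp
  | cons r t ih =>
    intro cr lines hlt
    have hcr : cr < r := hlt r (by simp)
    have hpair := (List.pairwise_cons.mp hs)
    simp only [List.flatMap_cons, List.foldl_append]
    rw [pv_gfold_row r _ (pvRowCh_fst _ _ r) cr (by omega)]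
    by_cases hE : pvRowCh (PySem.List.pyGetD old_grid r []) (PySem.List.pyGetD new_grid r []) r = []
    · have hcols : pvRowCols (PySem.List.pyGetD old_grid r []) (PySem.List.pyGetD new_grid r []) = [] := by
        rw [← pvRowCh_map_colLine _ _ r, hE]; rfl
      rw [if_pos hE, ih hpair.2 cr lines (fun r' hr' => lt_trans hcr (hpair.1 r' hr'))]
      simp [pvBlk, hcols]
    · have hcols : pvRowCols (PySem.List.pyGetD old_grid r []) (PySem.List.pyGetD new_grid r []) ≠ [] := by
        rw [← pvRowCh_map_colLine _ _ r]; simpa using hE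
      rw [if_neg hE, ih hpair.2 r _ hpair.1]
      simp [pvBlk, hcols, pvRowCh_map_colLine]

-- B's fold, closed form
theorem pvB_fold (old_grid new_grid : List (List Int)) (rs : List Int) :
    ∀ (body : List String) (count : Int),
    rs.foldl (pvB_step old_grid new_grid) (body, count) =
      (body ++ rs.flatMap (pvBlk old_grid new_grid),
       count + ((rs.map (fun r =>
         ((pvRowCols (PySem.List.pyGetD old_grid r []) (PySem.List.pyGetD new_grid r [])).length : Int))).sum)) := by
  induction rs with
  | nil => intro body count; simp
  | cons r t ih =>
    intro body count
    simp only [List.foldl_cons, List.flatMap_cons, List.map_cons, List.sum_cons]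
    by_cases hE : pvRowCols (PySem.List.pyGetD old_grid r []) (PySem.List.pyGetD new_grid r []) = []
    · rw [show pvB_step old_grid new_grid (body, count) r = (body, count) by simp [pvB_step, hE]]
      rw [ih body count]
      simp [pvBlk, hE]
    · rw [show pvB_step old_grid new_grid (body, count) r =
          (body ++ ("  Row " ++ PySem.Int.toStr r ++ ":") ::
              pvRowCols (PySem.List.pyGetD old_grid r []) (PySem.List.pyGetD new_grid r []),
           count + ((pvRowCols (PySem.List.pyGetD old_grid r []) (PySem.List.pyGetD new_grid r [])).length : Int)) by
        simp [pvB_step, hE]]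
      rw [ih]
      simp [pvBlk, hE]
      ring

-- sum of cast lengths is cast of total length of the flat-mapped change list
theorem pv_count_eq (old_grid new_grid : List (List Int)) (rs : List Int) :
    ((rs.map (fun r =>
        ((pvRowCols (PySem.List.pyGetD old_grid r []) (PySem.List.pyGetD new_grid r [])).length : Int))).sum) =
      (((rs.flatMap (fun r =>
          pvRowCh (PySem.List.pyGetD old_grid r []) (PySem.List.pyGetD new_grid r []) r)).length : Nat) : Int) := by
  induction rs with
  | nil => simp
  | cons r t ih =>
    simp only [List.map_cons, List.sum_cons, List.flatMap_cons, List.length_append, ih,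
      pvRowCh_length]
    push_cast
    ring

-- ===== VERDICT (by name: the statement is the Claim_ definition above) =====
theorem as_diff_frames_spec : Claim_equal_as_diff_frames := by
  intro old_grid new_grid _
  unfold Spec_as_diff_frames as_diff_frames as_diff_frames_alt
  by_cases hempty : old_grid = [] ∨ new_grid = []
  · simp [hempty]
  · rw [if_neg hempty, if_neg hempty]
    dsimp only
    rw [pvA_changes_eq, pvB_fold, pv_count_eq]
    dsimp only
    simp only [zero_add, List.nil_append]
    by_cases hch :
        (PySem.List.pyRange 0 ((min old_grid.length new_grid.length : Nat) : Int) 1).flatMap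
          (fun r => pvRowCh (PySem.List.pyGetD old_grid r []) (PySem.List.pyGetD new_grid r []) r) = []
    · rw [if_pos hch, if_pos (by rw [hch]; rfl)]
    · have hlen : ¬ ((((PySem.List.pyRange 0 ((min old_grid.length new_grid.length : Nat) : Int) 1).flatMap
          (fun r => pvRowCh (PySem.List.pyGetD old_grid r []) (PySem.List.pyGetD new_grid r []) r)).length : Int) = 0) := by
        intro h
        exact hch (List.length_eq_zero_iff.mp (by exact_mod_cast h))
      rw [if_neg hch, if_neg hlen]
      rw [pv_gfold_rows old_grid new_grid _
        (PySem.List.pairwise_lt_pyRange_one 0 _) (-1) _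
        (by intro r hr
            have := (PySem.List.mem_pyRange_one.mp hr).1
            omega)]
      simp only [List.cons_append, List.nil_append]
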